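-- pv_equiv track=rewrite | github.com/g-duff/JSON-journal | json_journal/data_analysis.py | parent_account_balances
-- ===== SOURCE A (Python) =====
-- ACCOUNT_NAME_SEPARATOR = ':'
--
-- def parent_account_balances(full_account_name_balances):
--     '''
--     Calculate balances for all parent accounts.
--
--     Parameters
--     ----------
--     Full_account_name_balances : dict
--         Contains the full account name and corresponding balance.
--
--     Returns
--     -------
--     New_balances : dict
--         Contains balances for each parent account.
--     '''
--     new_balances = {}
--     for full_account_name in full_account_name_balances.keys():
--         account_separated = full_account_name.split(ACCOUNT_NAME_SEPARATOR)
--         for child_account_name in range(len(account_separated)):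
--             parent_account = ACCOUNT_NAME_SEPARATOR.join(
--                 account_separated[:child_account_name+1])
--             if parent_account in new_balances:
--                 new_balances[parent_account] += full_account_name_balances[full_account_name]
--             else:
--                 new_balances[parent_account] = full_account_name_balances[full_account_name]
--     return new_balances
-- ===== SOURCE B (Python) =====
-- ACCOUNT_NAME_SEPARATOR = ':'
--
--
-- def parent_account_balances(full_account_name_balances):
--     '''Two-stage rewrite: first collect every distinct parent path (as a
--     component list, in first-occurrence order), then compute each parent's
--     balance independently by scanning the accounts for that component prefix.'''
--     paths = []
--     for account in full_account_name_balances: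
--         parts = account.split(ACCOUNT_NAME_SEPARATOR)
--         for depth in range(1, len(parts) + 1):
--             if parts[:depth] not in paths:
--                 paths.append(parts[:depth])
--     return {
--         ACCOUNT_NAME_SEPARATOR.join(path): sum(
--             balance
--             for account, balance in full_account_name_balances.items()
--             if account.split(ACCOUNT_NAME_SEPARATOR)[:len(path)] == path)
--         for path in paths
--     }
-- ===== Notes on version B (the rewrite author's own statement) =====
-- stated objective: alternative
-- what changed: A makes one pass over the accounts, accumulating each balance into a dict entry per prefix as it goes; B is two staged passes: it first collects the distinct parent paths as component lists in first-occurrence order, then computes each parent's balance independently by rescanning all accounts and summing those whose split has that path as a component prefix.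
import Mathlib
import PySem

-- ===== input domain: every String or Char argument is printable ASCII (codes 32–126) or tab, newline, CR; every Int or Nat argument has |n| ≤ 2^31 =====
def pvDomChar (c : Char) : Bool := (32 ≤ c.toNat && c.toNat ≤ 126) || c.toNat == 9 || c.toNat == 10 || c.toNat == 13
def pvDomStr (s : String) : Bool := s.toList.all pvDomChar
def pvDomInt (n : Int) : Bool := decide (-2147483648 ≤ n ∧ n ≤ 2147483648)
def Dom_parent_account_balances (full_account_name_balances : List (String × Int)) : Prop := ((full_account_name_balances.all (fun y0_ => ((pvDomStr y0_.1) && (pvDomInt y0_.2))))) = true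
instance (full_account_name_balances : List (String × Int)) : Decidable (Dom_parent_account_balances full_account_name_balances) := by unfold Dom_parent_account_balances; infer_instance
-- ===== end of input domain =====

-- B replaces A's single accumulation pass (per account, add its balance into the dict
-- entry of every prefix) by two staged passes: collect the distinct parent paths as
-- component lists in first-occurrence order, then compute each parent's balance
-- independently by rescanning the accounts for that component prefix; objective:
-- alternative (same results, different algorithm; not faster).
-- The Python dict argument/result is the association list of its items; both ports
-- realise the dict via PySem.Dict.ofList (later duplicate keys overwrite, keeping position).

-- ===== PORT A =====
-- new_balances[parent] += v  is  get-then-set: insert parent (getD parent 0 + v)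
def parent_account_balances (full_account_name_balances : List (String × Int)) : List (String × Int) :=
  let d := PySem.Dict.ofList full_account_name_balances
  (d.keys.foldl (fun nb full_account_name =>
      let account_separated := (PySem.Str.split? full_account_name ":").getD []   -- sep ":" ≠ "": split? is `some` here
      (PySem.List.pyRange 0 (PySem.List.len account_separated) 1).foldl (fun nb child_account_name =>
          let parent_account := PySem.Str.join ":"
            (PySem.List.slice account_separated none (some (child_account_name + 1)))
          if nb.contains parent_account then
            nb.insert parent_account (nb.getD parent_account 0 + d.getD full_account_name 0)
          else
            nb.insert parent_account (d.getD full_account_name 0)) nb)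
    PySem.Dict.empty).items

-- ===== PORT B =====
-- stage 1: `parts[:depth] not in paths` is list membership; stage 2's dict comprehension
-- is the fold of insert over the collected paths, its sum(...) the conditional-add fold.
def parent_account_balances_alt (full_account_name_balances : List (String × Int)) : List (String × Int) :=
  let d := PySem.Dict.ofList full_account_name_balances
  let paths : List (List String) := d.keys.foldl (fun paths account =>
      let parts := (PySem.Str.split? account ":").getD []   -- sep ":" ≠ "": split? is `some` here
      (PySem.List.pyRange 1 (PySem.List.len parts + 1) 1).foldl (fun paths depth =>
          if PySem.List.slice parts none (some depth) ∈ paths then paths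
          else paths ++ [PySem.List.slice parts none (some depth)]) paths) []
  (paths.foldl (fun nb path =>
      nb.insert (PySem.Str.join ":" path)
        (d.items.foldl (fun s ab =>
            if PySem.List.slice ((PySem.Str.split? ab.1 ":").getD []) none (some (PySem.List.len path)) = path
            then s + ab.2 else s) 0)) PySem.Dict.empty).items

-- ===== PRECONDITION & SPEC =====
def Spec_parent_account_balances (full_account_name_balances : List (String × Int)) (out : List (String × Int)) : Prop := out = parent_account_balances_alt full_account_name_balances
instance (full_account_name_balances : List (String × Int)) (out : List (String × Int)) : Decidable (Spec_parent_account_balances full_account_name_balances out) := by unfold Spec_parent_account_balances; infer_instance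

-- ===== CLAIM (what is proved, stated in full; the proofs are below) =====
def Claim_equal_parent_account_balances : Prop := ∀ (full_account_name_balances : List (String × Int)), Dom_parent_account_balances full_account_name_balances → Spec_parent_account_balances full_account_name_balances (parent_account_balances full_account_name_balances)

-- ===== LEMMAS AND PROOFS =====

def pvTail (c : Char) (pre : List Char) : List Char → List (List Char)
  | [] => [pre]
  | x :: rest => if x = c then pre :: pvTail c [] rest else pvTail c (pre ++ [x]) rest

lemma pvGo_eq (c : Char) : ∀ (fuel : Nat) (l cur : List Char) (acc : List (List Char)),
    l.length < fuel →
    PySem.Chars.splitOn.go [c] fuel l cur acc = acc.reverse ++ pvTail c cur.reverse l := by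
  intro fuel
  induction fuel with
  | zero => intro l cur acc h; omega
  | succ n ih =>
    intro l cur acc h
    cases l with
    | nil =>
        simp [PySem.Chars.splitOn.go, pvTail]
    | cons x rest =>
        by_cases hx : x = c
        · have hpre : [c].isPrefixOf (x :: rest) = true := by simp [hx, List.isPrefixOf]
          rw [PySem.Chars.splitOn.go]
          simp only [hpre, if_pos]
          rw [ih _ _ _ (by simpa using Nat.lt_of_succ_lt_succ h)]
          simp [pvTail, hx]
        · have hpre : [c].isPrefixOf (x :: rest) = false := by
            simp [List.isPrefixOf]; exact fun hh => (hx hh.symm).elim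
          rw [PySem.Chars.splitOn.go]
          simp only [hpre]
          rw [if_neg (by simp)]
          rw [ih _ _ _ (by simpa using Nat.lt_of_succ_lt_succ h)]
          simp [pvTail, hx]

lemma pvSplitOn_eq (c : Char) (cs : List Char) :
    PySem.Chars.splitOn cs [c] = pvTail c [] cs := by
  rw [PySem.Chars.splitOn, pvGo_eq c _ _ _ _ (by omega)]
  simp

lemma pvTail_ne_nil (c : Char) (pre l : List Char) : pvTail c pre l ≠ [] := by
  induction l generalizing pre with
  | nil => simp [pvTail]
  | cons x rest ih =>
      by_cases hx : x = c <;> simp [pvTail, hx, ih]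

lemma pvTail_no_sep (c : Char) : ∀ (l pre : List Char), c ∉ pre →
    ∀ p ∈ pvTail c pre l, c ∉ p := by
  intro l
  induction l with
  | nil => intro pre h p hp; simp [pvTail] at hp; subst hp; exact h
  | cons x rest ih =>
      intro pre h p hp
      by_cases hx : x = c
      · simp [pvTail, hx] at hp
        rcases hp with rfl | hp
        · exact h
        · exact ih [] (by simp) p hp
      · simp [pvTail, hx] at hp
        exact ih (pre ++ [x]) (by simp [h]; exact fun hh => hx hh.symm) p hp

def pvParts (a : String) : List String := (PySem.Str.split? a ":").getD []

def pvCF (p : List String) : Prop := ∀ s ∈ p, ':' ∉ s.toList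

def pvGood (p : List String) : Prop := p ≠ [] ∧ pvCF p

lemma pvParts_eq (a : String) :
    pvParts a = (pvTail ':' [] a.toList).map String.ofList := by
  simp [pvParts, PySem.Str.split?, PySem.Chars.split?, show (":" : String).toList = [':'] from by decide,
    pvSplitOn_eq]

lemma pvParts_good (a : String) : pvGood (pvParts a) := by
  rw [pvParts_eq]
  constructor
  · simp [pvTail_ne_nil]
  · intro s hs
    simp only [List.mem_map] at hs
    rcases hs with ⟨p, hp, rfl⟩
    rw [String.toList_ofList]
    exact pvTail_no_sep ':' _ [] (by simp) p hp

lemma pvJoin_inj {p q : List String} (hp : pvGood p) (hq : pvGood q)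
    (h : PySem.Str.join ":" p = PySem.Str.join ":" q) : p = q := by
  have h' := congrArg String.toList h
  rw [PySem.Str.toList_join, PySem.Str.toList_join] at h'
  simp only [PySem.Chars.join, show (":" : String).toList = [':'] from by decide] at h'
  have hsp : List.splitOn ':' ([':'].intercalate (p.map String.toList)) = p.map String.toList :=
    List.splitOn_intercalate _ ':' (by intro l hl; rcases List.mem_map.mp hl with ⟨s, hs, rfl⟩; exact hp.2 s hs)
      (by simpa using hp.1)
  have hsq : List.splitOn ':' ([':'].intercalate (q.map String.toList)) = q.map String.toList :=
    List.splitOn_intercalate _ ':' (by intro l hl; rcases List.mem_map.mp hl with ⟨s, hs, rfl⟩; exact hq.2 s hs)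
      (by simpa using hq.1)
  have : p.map String.toList = q.map String.toList := by rw [← hsp, ← hsq, h']
  exact List.map_injective_iff.mpr (fun a b hab => String.toList_inj.mp hab) this

lemma pvMapJoin_nodup {paths : List (List String)} (hnd : paths.Nodup)
    (hG : ∀ p ∈ paths, pvGood p) : (paths.map (PySem.Str.join ":")).Nodup :=
  List.Nodup.map_on (fun p hp q hq h => pvJoin_inj (hG p hp) (hG q hq) h) hnd

lemma pvMem_mapJoin {paths : List (List String)} (hG : ∀ p ∈ paths, pvGood p)
    {q : List String} (hq : pvGood q) :
    PySem.Str.join ":" q ∈ paths.map (PySem.Str.join ":") ↔ q ∈ paths := by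
  constructor
  · intro h
    rcases List.mem_map.mp h with ⟨p, hp, hpq⟩
    exact (pvJoin_inj (hG p hp) hq hpq) ▸ hp
  · exact fun h => List.mem_map_of_mem h

def pvPrefixes (ps : List String) : List (List String) :=
  (List.range ps.length).map (fun k => ps.take (k+1))

def pvPaths (accounts : List String) : List (List String) :=
  PySem.Set.ofList (accounts.flatMap (fun a => pvPrefixes (pvParts a)))

def pvSum (p : List String) (L : List (String × Int)) : Int :=
  ((L.filter (fun ab => decide ((pvParts ab.1).take p.length = p))).map (·.2)).sum

def pvCanon (L : List (String × Int)) : List (String × Int) :=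
  (pvPaths (L.map (·.1))).map (fun p => (PySem.Str.join ":" p, pvSum p L))

def pvStep (v : Int) (nb : PySem.Dict String Int) (parent : String) : PySem.Dict String Int :=
  nb.insert parent (nb.getD parent 0 + v)

lemma pvMem_prefixes (ps p : List String) :
    p ∈ pvPrefixes ps ↔ ps.take p.length = p ∧ p ≠ [] := by
  constructor
  · intro h
    rcases List.mem_map.mp h with ⟨k, hk, rfl⟩
    rw [List.mem_range] at hk
    have hlen : (ps.take (k+1)).length = k+1 := by
      rw [List.length_take]; omega
    refine ⟨by rw [hlen], by intro hnil; rw [hnil] at hlen; simp at hlen⟩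
  · rintro ⟨htake, hne⟩
    have h1 : 1 ≤ p.length := by
      cases p with
      | nil => exact absurd rfl hne
      | cons _ _ => simp
    have hle : p.length ≤ ps.length := by
      have := congrArg List.length htake
      rw [List.length_take] at this
      omega
    refine List.mem_map.mpr ⟨p.length - 1, List.mem_range.mpr (by omega), ?_⟩
    rw [show p.length - 1 + 1 = p.length from by omega, htake]

lemma pvPrefixes_nodup (ps : List String) : (pvPrefixes ps).Nodup := by
  refine List.Nodup.map_on ?_ (List.nodup_range)
  intro k hk j hj h
  rw [List.mem_range] at hk hj
  have hkk := congrArg List.length h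
  rw [List.length_take, List.length_take] at hkk
  omega

lemma pvPrefixes_good (a : String) : ∀ p ∈ pvPrefixes (pvParts a), pvGood p := by
  intro p hp
  rw [pvMem_prefixes] at hp
  refine ⟨hp.2, ?_⟩
  intro s hs
  exact (pvParts_good a).2 s (by rw [← hp.1] at hs; exact List.mem_of_mem_take hs)

lemma pvMem_update {s : List (List String)} {xs : List (List String)} {y : List String} :
    y ∈ PySem.Set.update s xs ↔ y ∈ s ∨ y ∈ xs := by
  induction xs generalizing s with
  | nil => simp [PySem.Set.update]
  | cons x xs ih =>
      show y ∈ PySem.Set.update (PySem.Set.add s x) xs ↔ _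
      rw [ih, PySem.Set.mem_add]
      simp only [List.mem_cons]
      tauto

lemma pvUpdate_append (s : List (List String)) (xs ys : List (List String)) :
    PySem.Set.update s (xs ++ ys) = PySem.Set.update (PySem.Set.update s xs) ys := by
  simp [PySem.Set.update, List.foldl_append]

lemma pvPaths_append (acc : List String) (a : String) :
    pvPaths (acc ++ [a]) = PySem.Set.update (pvPaths acc) (pvPrefixes (pvParts a)) := by
  rw [pvPaths, pvPaths, List.flatMap_append, PySem.Set.ofList_eq_foldl,
    PySem.Set.ofList_eq_foldl, List.foldl_append]
  simp [PySem.Set.update, List.flatMap]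

lemma pvPaths_good (acc : List String) : ∀ p ∈ pvPaths acc, pvGood p := by
  intro p hp
  rw [pvPaths, PySem.Set.mem_ofList, List.mem_flatMap] at hp
  rcases hp with ⟨a, _, hp⟩
  exact pvPrefixes_good a p hp

lemma pvPaths_closure {acc : List String} {a : String} (ha : a ∈ acc) :
    ∀ p ∈ pvPrefixes (pvParts a), p ∈ pvPaths acc := by
  intro p hp
  rw [pvPaths, PySem.Set.mem_ofList, List.mem_flatMap]
  exact ⟨a, ha, hp⟩

lemma pvSum_append (p : List String) (L : List (String × Int)) (a : String) (v : Int) :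
    pvSum p (L ++ [(a, v)]) =
      pvSum p L + (if (pvParts a).take p.length = p then v else 0) := by
  rw [pvSum, pvSum, List.filter_append, List.map_append, List.sum_append]
  by_cases h : (pvParts a).take p.length = p <;> simp [h]

lemma pvSum_zero {p : List String} {L : List (String × Int)} (hp : pvGood p)
    (h : p ∉ pvPaths (L.map (·.1))) : pvSum p L = 0 := by
  rw [pvSum, List.filter_eq_nil_iff.mpr, List.map_nil, List.sum_nil]
  intro ab hab
  simp only [decide_eq_true_eq]
  intro htake
  exact h (pvPaths_closure (List.mem_map_of_mem hab)
    p ((pvMem_prefixes _ _).mpr ⟨htake, hp.1⟩))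

lemma pvStepA_eq (v : Int) (nb : PySem.Dict String Int) (p : String) :
    (if nb.contains p then nb.insert p (nb.getD p 0 + v) else nb.insert p v) = pvStep v nb p := by
  unfold pvStep
  by_cases h : nb.contains p = true
  · simp [h]
  · simp only [Bool.not_eq_true] at h
    simp [h, PySem.Dict.getD_of_not_contains _ _ h]

lemma pvContains_canon (d : PySem.Dict String Int) (paths : List (List String))
    (s : List String → Int) (q : List String)
    (hitems : d.items = paths.map (fun p => (PySem.Str.join ":" p, s p)))
    (hG : ∀ p ∈ paths, pvGood p) (hq : pvGood q) :
    d.contains (PySem.Str.join ":" q) = decide (q ∈ paths) := by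
  have hkeys : d.keys = paths.map (PySem.Str.join ":") := by
    simp only [PySem.Dict.keys, hitems, List.map_map]; rfl
  by_cases h : q ∈ paths
  · simp only [h, decide_true]
    exact (PySem.Dict.contains_iff_mem_keys d _).mpr
      (hkeys ▸ (pvMem_mapJoin hG hq).mpr h)
  · simp only [h, decide_false]
    rw [← Bool.not_eq_true]
    intro hc
    exact h ((pvMem_mapJoin hG hq).mp (hkeys ▸ (PySem.Dict.contains_iff_mem_keys d _).mp hc))

lemma pvStep_items (d : PySem.Dict String Int) (paths : List (List String))
    (s : List String → Int) (v : Int) (q : List String)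
    (hitems : d.items = paths.map (fun p => (PySem.Str.join ":" p, s p)))
    (hnd : paths.Nodup) (hG : ∀ p ∈ paths, pvGood p) (hq : pvGood q) :
    (pvStep v d (PySem.Str.join ":" q)).items =
      if q ∈ paths then
        paths.map (fun p => (PySem.Str.join ":" p, if p = q then s p + v else s p))
      else
        paths.map (fun p => (PySem.Str.join ":" p, s p)) ++ [(PySem.Str.join ":" q, 0 + v)] := by
  have hnk : d.keys.Nodup := by
    have hkeys : d.keys = paths.map (PySem.Str.join ":") := by
      simp only [PySem.Dict.keys, hitems, List.map_map]; rfl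
    rw [hkeys]; exact pvMapJoin_nodup hnd hG
  have hcon := pvContains_canon d paths s q hitems hG hq
  by_cases h : q ∈ paths
  · have hc : d.contains (PySem.Str.join ":" q) = true := by rw [hcon]; simp [h]
    have hget : d.getD (PySem.Str.join ":" q) 0 = s q := by
      refine PySem.Dict.getD_of_mem_items d ?_ hnk 0
      rw [hitems]
      exact List.mem_map.mpr ⟨q, h, rfl⟩
    rw [if_pos h, pvStep, PySem.Dict.items_insert_of_contains d _ hc, hitems, hget,
      List.map_map]
    refine List.map_congr_left ?_
    intro p hp
    by_cases hpq : p = q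
    · subst hpq
      simp [beq_iff_eq]
    · have : (PySem.Str.join ":" p == PySem.Str.join ":" q) = false := by
        rw [beq_eq_false_iff_ne]
        intro hj
        exact hpq (pvJoin_inj (hG p hp) hq hj)
      simp [Function.comp, this, hpq]
  · have hc : d.contains (PySem.Str.join ":" q) = false := by rw [hcon]; simp [h]
    have hget : d.getD (PySem.Str.join ":" q) 0 = 0 :=
      PySem.Dict.getD_of_not_contains d 0 hc
    rw [if_neg h, pvStep, PySem.Dict.items_insert_of_not_contains d _ hc, hitems, hget]

lemma pvAdd_of_mem {s : List (List String)} {x : List String} (h : x ∈ s) :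
    PySem.Set.add s x = s := by
  simp [PySem.Set.add, h]

lemma pvAdd_of_not_mem {s : List (List String)} {x : List String} (h : x ∉ s) :
    PySem.Set.add s x = s ++ [x] := by
  simp [PySem.Set.add, h]

lemma pvFoldQ (Q : List (List String)) (d : PySem.Dict String Int)
    (paths : List (List String)) (s : List String → Int) (v : Int)
    (hitems : d.items = paths.map (fun p => (PySem.Str.join ":" p, s p)))
    (hndP : paths.Nodup) (hGP : ∀ p ∈ paths, pvGood p)
    (hGQ : ∀ q ∈ Q, pvGood q) (hndQ : Q.Nodup) :
    (Q.foldl (fun nb q => pvStep v nb (PySem.Str.join ":" q)) d).items =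
      (PySem.Set.update paths Q).map (fun p =>
        (PySem.Str.join ":" p,
          (if p ∈ paths then s p else 0) + (if p ∈ Q then v else 0))) := by
  induction Q generalizing d paths s with
  | nil =>
      simp only [List.foldl_nil, PySem.Set.update, hitems]
      refine List.map_congr_left ?_
      intro p hp
      simp [hp]
  | cons q Q ih =>
      have hndQ' : Q.Nodup := hndQ.of_cons
      have hqQ : q ∉ Q := (List.nodup_cons.mp hndQ).1
      have hq : pvGood q := hGQ q (List.mem_cons_self)
      rw [List.foldl_cons]
      have hupd : PySem.Set.update paths (q :: Q) = PySem.Set.update (PySem.Set.add paths q) Q := rfl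
      by_cases h : q ∈ paths
      · have hstep := pvStep_items d paths s v q hitems hndP hGP hq
        rw [if_pos h] at hstep
        rw [ih _ paths (fun p => if p = q then s p + v else s p) hstep hndP hGP
          (fun r hr => hGQ r (List.mem_cons_of_mem _ hr)) hndQ',
          hupd, pvAdd_of_mem h]
        refine List.map_congr_left ?_
        intro p hp
        rcases pvMem_update.mp hp with hp' | hp'
        · by_cases hpq : p = q
          · subst hpq
            have : p ∉ Q := hqQ
            simp [h, this]
          · simp [hpq, List.mem_cons]
        · have hpq : p ≠ q := fun hh => hqQ (hh ▸ hp')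
          simp [hpq, hp', List.mem_cons]
      · have hstep := pvStep_items d paths s v q hitems hndP hGP hq
        rw [if_neg h] at hstep
        have hstep' : (pvStep v d (PySem.Str.join ":" q)).items =
            (paths ++ [q]).map (fun p => (PySem.Str.join ":" p,
              if p = q then 0 + v else s p)) := by
          rw [hstep, List.map_append]
          refine congrArg₂ _ ?_ (by simp)
          refine List.map_congr_left ?_
          intro p hp
          have hpq : p ≠ q := fun hh => h (hh ▸ hp)
          simp [hpq]
        have hnd' : (paths ++ [q]).Nodup := by
          simp [List.nodup_append, hndP]
          exact fun a ha hh => h (hh ▸ ha)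
        have hG' : ∀ p ∈ paths ++ [q], pvGood p := by
          intro p hp
          rcases List.mem_append.mp hp with hp' | hp'
          · exact hGP p hp'
          · simp at hp'; exact hp' ▸ hq
        rw [ih _ (paths ++ [q]) (fun p => if p = q then 0 + v else s p) hstep' hnd' hG'
          (fun r hr => hGQ r (List.mem_cons_of_mem _ hr)) hndQ',
          hupd, pvAdd_of_not_mem h]
        refine List.map_congr_left ?_
        intro p hp
        rcases pvMem_update.mp hp with hp' | hp'
        · rcases List.mem_append.mp hp' with hp'' | hp''
          · have hpq : p ≠ q := fun hh => h (hh ▸ hp'')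
            simp [hpq, hp'', List.mem_cons, hp']
          · simp at hp''
            subst hp''
            simp [h, hqQ]
        · have hpq : p ≠ q := fun hh => hqQ (hh ▸ hp')
          simp [hpq, hp', List.mem_cons, List.mem_append]

lemma pvInnerA (v : Int) (a : String) (nb : PySem.Dict String Int) :
    (PySem.List.pyRange 0 (PySem.List.len (pvParts a)) 1).foldl (fun nb k =>
        let parent := PySem.Str.join ":" (PySem.List.slice (pvParts a) none (some (k + 1)))
        if nb.contains parent then nb.insert parent (nb.getD parent 0 + v)
        else nb.insert parent v) nb =
      (pvPrefixes (pvParts a)).foldl (fun nb q => pvStep v nb (PySem.Str.join ":" q)) nb := by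
  generalize pvParts a = parts
  rw [PySem.List.len_eq, PySem.List.pyRange_zero_natCast, List.foldl_map]
  have hbody : ∀ (nb : PySem.Dict String Int), ∀ j ∈ List.range parts.length,
      (fun (nb : PySem.Dict String Int) (j : Nat) =>
        let parent := PySem.Str.join ":" (PySem.List.slice parts none (some ((j : Int) + 1)))
        if nb.contains parent then nb.insert parent (nb.getD parent 0 + v)
        else nb.insert parent v) nb j =
      pvStep v nb (PySem.Str.join ":" (parts.take (j + 1))) := by
    intro nb j _
    have hc : ((j : Int) + 1) = ((j + 1 : Nat) : Int) := by push_cast; ring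
    simp only [hc, PySem.List.slice_to_natCast]
    exact pvStepA_eq v nb _
  rw [PySem.List.foldl_congr_mem _ _ _ _ hbody, pvPrefixes, List.foldl_map]

lemma pvA_main (L : List (String × Int)) :
    (L.foldl (fun nb ab =>
        (pvPrefixes (pvParts ab.1)).foldl (fun nb q => pvStep ab.2 nb (PySem.Str.join ":" q)) nb)
      PySem.Dict.empty).items = pvCanon L := by
  induction L using List.reverseRecOn with
  | nil => simp [pvCanon, pvPaths, pvSum, PySem.Set.ofList_eq_foldl]; rfl
  | append_singleton M x ih =>
      rw [List.foldl_append, List.foldl_cons, List.foldl_nil]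
      rw [pvFoldQ _ _ (pvPaths (M.map (·.1))) (fun p => pvSum p M) x.2 ih
        (PySem.Set.nodup_ofList _) (pvPaths_good _) (pvPrefixes_good x.1)
        (pvPrefixes_nodup _)]
      rw [pvCanon, List.map_append, List.map_cons, List.map_nil, pvPaths_append]
      refine List.map_congr_left ?_
      intro p hp
      have hpG : pvGood p := by
        rcases pvMem_update.mp hp with hp' | hp'
        · exact pvPaths_good _ p hp'
        · exact pvPrefixes_good x.1 p hp'
      have h1 : (if p ∈ pvPaths (M.map (·.1)) then pvSum p M else 0) = pvSum p M := by
        by_cases h : p ∈ pvPaths (M.map (·.1))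
        · simp [h]
        · simp [h, pvSum_zero hpG h]
      have h2 : (if p ∈ pvPrefixes (pvParts x.1) then x.2 else 0) =
          (if (pvParts x.1).take p.length = p then x.2 else 0) := by
        by_cases h : (pvParts x.1).take p.length = p
        · simp [h, (pvMem_prefixes _ _).mpr ⟨h, hpG.1⟩]
        · rw [if_neg h, if_neg (fun hc => h ((pvMem_prefixes _ _).mp hc).1)]
      rw [h1, h2, ← pvSum_append]

lemma pvRange1 (n : Nat) :
    PySem.List.pyRange 1 ((n : Int) + 1) 1 = (List.range n).map (fun k : Nat => ((k : Int) + 1)) := by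
  induction n with
  | zero => decide
  | succ m ih =>
      rw [show ((m + 1 : Nat) : Int) + 1 = (((m : Int) + 1) + 1) from by push_cast; ring,
        PySem.List.pyRange_one_succ_right (by omega), ih]
      rw [List.range_succ, List.map_append]
      simp

lemma pvB_inner_paths (parts : List String) (paths : List (List String)) :
    (PySem.List.pyRange 1 (PySem.List.len parts + 1) 1).foldl (fun paths depth =>
        if PySem.List.slice parts none (some depth) ∈ paths then paths
        else paths ++ [PySem.List.slice parts none (some depth)]) paths =
      PySem.Set.update paths (pvPrefixes parts) := by
  rw [PySem.List.len_eq, pvRange1, List.foldl_map]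
  have hbody : ∀ (acc : List (List String)), ∀ k ∈ List.range parts.length,
      (fun (paths : List (List String)) (k : Nat) =>
        if PySem.List.slice parts none (some ((k : Int) + 1)) ∈ paths then paths
        else paths ++ [PySem.List.slice parts none (some ((k : Int) + 1))]) acc k =
      PySem.Set.add acc (parts.take (k+1)) := by
    intro acc k _
    have hc : ((k : Int) + 1) = ((k + 1 : Nat) : Int) := by push_cast; ring
    simp only [hc, PySem.List.slice_to_natCast]
    by_cases h : parts.take (k+1) ∈ acc
    · rw [if_pos h, pvAdd_of_mem h]
    · rw [if_neg h, pvAdd_of_not_mem h]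
  rw [PySem.List.foldl_congr_mem _ _ _ _ hbody, pvPrefixes, PySem.Set.update, List.foldl_map]

lemma pvB_paths_gen (accounts : List String) (s : List (List String)) :
    accounts.foldl (fun paths account =>
        PySem.Set.update paths (pvPrefixes (pvParts account))) s =
      PySem.Set.update s (accounts.flatMap (fun a => pvPrefixes (pvParts a))) := by
  induction accounts generalizing s with
  | nil => rfl
  | cons a acc ih =>
      rw [List.foldl_cons, ih, List.flatMap_cons, pvUpdate_append]

lemma pvB_sum (p : List String) (L : List (String × Int)) :
    L.foldl (fun s ab =>
        if PySem.List.slice ((PySem.Str.split? ab.1 ":").getD []) none (some (PySem.List.len p)) = p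
        then s + ab.2 else s) 0 = pvSum p L := by
  have hbody : ∀ (s : Int), ∀ ab ∈ L,
      (fun (s : Int) (ab : String × Int) =>
        if PySem.List.slice ((PySem.Str.split? ab.1 ":").getD []) none (some (PySem.List.len p)) = p
        then s + ab.2 else s) s ab =
      (fun (s : Int) (ab : String × Int) =>
        if (pvParts ab.1).take p.length = p then s + ab.2 else s) s ab := by
    intro s ab _
    simp only [PySem.List.len_eq, PySem.List.slice_to_natCast]
    rfl
  rw [PySem.List.foldl_congr_mem _ _ _ _ hbody,
    PySem.List.foldl_ite_eq_foldl_filter (p := fun ab : String × Int => (pvParts ab.1).take p.length = p)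
      (f := fun s ab => s + ab.2) (l := L) (init := 0)]
  rw [show (fun (s : Int) (ab : String × Int) => s + ab.2) = (fun s ab => s + (fun x : String × Int => x.2) ab) from rfl,
    PySem.List.foldl_add]
  simp [pvSum]


-- ===== VERDICT (by name: the statement is the Claim_ definition above) =====
theorem parent_account_balances_spec : Claim_equal_parent_account_balances := by
  intro l _
  unfold Spec_parent_account_balances parent_account_balances parent_account_balances_alt
  simp only []
  set d := PySem.Dict.ofList l with hd
  -- A side
  have hA : (d.keys.foldl (fun nb full_account_name =>
        (PySem.List.pyRange 0 (PySem.List.len ((PySem.Str.split? full_account_name ":").getD [])) 1).foldl (fun nb child_account_name =>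
            let parent_account := PySem.Str.join ":"
              (PySem.List.slice ((PySem.Str.split? full_account_name ":").getD []) none (some (child_account_name + 1)))
            if nb.contains parent_account then
              nb.insert parent_account (nb.getD parent_account 0 + d.getD full_account_name 0)
            else
              nb.insert parent_account (d.getD full_account_name 0)) nb)
      PySem.Dict.empty).items = pvCanon d.items := by
    simp only [PySem.Dict.keys, List.foldl_map]
    rw [PySem.List.foldl_congr_mem (g := fun nb (ab : String × Int) =>
        (pvPrefixes (pvParts ab.1)).foldl (fun nb q => pvStep ab.2 nb (PySem.Str.join ":" q)) nb)]
    · exact pvA_main d.items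
    · intro nb ab hab
      have hget : d.getD ab.1 0 = ab.2 :=
        PySem.Dict.getD_of_mem_items _ (by simpa using hab) (PySem.Dict.nodup_keys_ofList l) 0
      simp only [hget]
      exact pvInnerA ab.2 ab.1 nb
  -- B side
  have hpaths : (d.keys.foldl (fun paths account =>
        (PySem.List.pyRange 1 (PySem.List.len ((PySem.Str.split? account ":").getD []) + 1) 1).foldl (fun paths depth =>
            if PySem.List.slice ((PySem.Str.split? account ":").getD []) none (some depth) ∈ paths then paths
            else paths ++ [PySem.List.slice ((PySem.Str.split? account ":").getD []) none (some depth)]) paths) []) =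
      pvPaths d.keys := by
    rw [PySem.List.foldl_congr_mem (g := fun paths account =>
        PySem.Set.update paths (pvPrefixes (pvParts account)))]
    · rw [pvB_paths_gen, pvPaths, PySem.Set.ofList_eq_foldl]; rfl
    · intro paths account _
      exact pvB_inner_paths (pvParts account) paths
  rw [hA, hpaths]
  rw [PySem.Dict.items_foldl_insert_fresh (l := pvPaths d.keys)
    (k := fun p => PySem.Str.join ":" p)
    (v := fun path => d.items.foldl (fun s ab =>
        if PySem.List.slice ((PySem.Str.split? ab.1 ":").getD []) none (some (PySem.List.len path)) = path
        then s + ab.2 else s) 0)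
    (d := PySem.Dict.empty)
    (fun p _ => PySem.Dict.contains_empty _)
    (pvMapJoin_nodup (PySem.Set.nodup_ofList _) (pvPaths_good _))]
  rw [show (PySem.Dict.empty : PySem.Dict String Int).items = [] from rfl, List.nil_append]
  rw [pvCanon]
  rw [show pvPaths (d.items.map (·.1)) = pvPaths d.keys from rfl]
  refine List.map_congr_left ?_
  intro p _
  rw [pvB_sum]
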